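-- pv_equiv track=rewrite | github.com/tsouvarev/advent_of_code | 2015/11_corporate_policy/part_1.py | _skip_forbidden_tail
-- ===== SOURCE A (Python) =====
-- FORBIDDEN_LETTERS = {"i", "o", "l"}
--
-- def _skip_forbidden_tail(password: str) -> str:
--     new_password = []
--
--     for i, c in enumerate(password):
--         if c not in FORBIDDEN_LETTERS:
--             new_password.append(c)
--         else:
--             tail_len = len(password) - i - 1
--             new_password.append(_incr_char(c))
--             new_password.extend("a" * tail_len)
--             break
--
--     return "".join(new_password)
--
-- def _incr_char(c: str) -> str:
--     return chr(ord(c) + 1)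
-- ===== SOURCE B (Python) =====
-- FORBIDDEN_ORDER = "iol"
--
-- def _skip_forbidden_tail(password: str) -> str:
--     hits = [j for j in (password.find(ch) for ch in FORBIDDEN_ORDER) if j >= 0]
--     if not hits:
--         return password
--     i = min(hits)
--     return password[:i] + chr(ord(password[i]) + 1) + "a" * (len(password) - i - 1)
-- ===== Notes on version B (the rewrite author's own statement) =====
-- stated objective: alternative
-- what changed: Replaces the indexed character-by-character scan with break and list accumulator by three whole-string str.find searches, a min over the non-negative hits, and a slice-based rebuild password[:i] + chr(ord(password[i])+1) + 'a'*(len-i-1).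
import Mathlib
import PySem

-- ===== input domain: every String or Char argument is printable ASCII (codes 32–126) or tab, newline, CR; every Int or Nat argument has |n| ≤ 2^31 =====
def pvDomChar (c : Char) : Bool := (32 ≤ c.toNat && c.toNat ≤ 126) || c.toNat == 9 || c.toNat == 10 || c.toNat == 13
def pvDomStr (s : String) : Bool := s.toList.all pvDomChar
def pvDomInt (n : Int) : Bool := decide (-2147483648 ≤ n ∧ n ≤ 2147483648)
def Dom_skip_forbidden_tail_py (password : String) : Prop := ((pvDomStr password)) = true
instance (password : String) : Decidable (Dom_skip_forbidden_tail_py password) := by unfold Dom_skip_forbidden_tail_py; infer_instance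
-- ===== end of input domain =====

-- B replaces A's indexed scan-with-break by three whole-string finds, a min over the
-- non-negative hits, and a slice-based rebuild (objective: alternative decomposition).

-- ===== PORT A =====
-- FORBIDDEN_LETTERS = {"i", "o", "l"}: a constant set of distinct letters, used only for
-- membership tests; ported as the distinct-element list (exact for membership).
def pvForbidden : List Char := ['i', 'o', 'l']

-- _incr_char: chr(ord(c) + 1)
def pvIncrChar (c : Char) : Char := Char.ofNat (c.toNat + 1)

-- the `for i, c in enumerate(password)` loop with break; `n` is len(password); the
-- accumulator list is produced front-to-back by the recursion exactly as appended.
def pvGoA : List Char → Nat → Nat → List Char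
  | [], _, _ => []
  | c :: t, i, n =>
    if ¬ (c ∈ pvForbidden) then
      c :: pvGoA t (i + 1) n
    else
      pvIncrChar c :: List.replicate (n - i - 1) 'a'

def skip_forbidden_tail_py (password : String) : String :=
  String.ofList (pvGoA password.toList 0 password.toList.length)

-- ===== PORT B =====
def skip_forbidden_tail_py_alt (password : String) : String :=
  -- hits = [j for j in (password.find(ch) for ch in FORBIDDEN_ORDER) if j >= 0]
  match (pvForbidden.map (fun ch => PySem.Str.find password (String.ofList [ch]))).filter
      (fun j => decide (0 ≤ j)) with
  | [] => password
  | h :: t =>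
    -- i = min(hits); password[:i] + chr(ord(password[i]) + 1) + "a" * (len(password) - i - 1)
    match PySem.Str.pyGet? password (t.foldl min h) with
    | none => password   -- unreachable: min(hits) is an in-range index (Python would raise IndexError)
    | some c =>
      String.ofList (PySem.List.slice password.toList none (some (t.foldl min h)) ++
        [Char.ofNat (c.toNat + 1)] ++
        List.replicate (password.toList.length - (t.foldl min h).toNat - 1) 'a')

-- ===== PRECONDITION & SPEC =====
def Spec_skip_forbidden_tail_py (password : String) (out : String) : Prop := out = skip_forbidden_tail_py_alt password
instance (password : String) (out : String) : Decidable (Spec_skip_forbidden_tail_py password out) := by unfold Spec_skip_forbidden_tail_py; infer_instance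

-- ===== CLAIM (what is proved, stated in full; the proofs are below) =====
def Claim_equal_skip_forbidden_tail_py : Prop := ∀ (password : String), Dom_skip_forbidden_tail_py password → Spec_skip_forbidden_tail_py password (skip_forbidden_tail_py password)

-- ===== LEMMAS AND PROOFS =====

lemma pvGoA_no (cs : List Char) (i n : Nat) (h : ∀ c ∈ cs, c ∉ pvForbidden) :
    pvGoA cs i n = cs := by
  induction cs generalizing i with
  | nil => simp [pvGoA]
  | cons c t ih =>
    have hc : c ∉ pvForbidden := h c (by simp)
    simp only [pvGoA]
    rw [if_pos hc]
    exact congrArg (c :: ·) (ih (i + 1) (fun x hx => h x (List.mem_cons_of_mem _ hx)))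

lemma pvGoA_yes (cs : List Char) (i n j : Nat) (c0 : Char)
    (hj : cs[j]? = some c0) (hc0 : c0 ∈ pvForbidden)
    (hmin : ∀ k < j, ∀ c, cs[k]? = some c → c ∉ pvForbidden) :
    pvGoA cs i n = cs.take j ++ pvIncrChar c0 :: List.replicate (n - (i + j) - 1) 'a' := by
  induction cs generalizing i j with
  | nil => simp at hj
  | cons c t ih =>
    cases j with
    | zero =>
      simp only [List.getElem?_cons_zero, Option.some.injEq] at hj
      subst hj
      simp only [pvGoA]
      rw [if_neg (not_not_intro hc0)]
      simp
    | succ j' =>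
      have hc : c ∉ pvForbidden := hmin 0 (Nat.succ_pos _) c (by simp)
      simp only [pvGoA]
      rw [if_pos hc]
      have hj' : t[j']? = some c0 := by simpa using hj
      have hmin' : ∀ k < j', ∀ cc, t[k]? = some cc → cc ∉ pvForbidden := by
        intro k hk cc hcc
        exact hmin (k + 1) (by omega) cc (by simpa using hcc)
      rw [ih (i + 1) j' hj' hmin']
      have harith : n - (i + 1 + j') - 1 = n - (i + (j' + 1)) - 1 := by omega
      rw [harith]
      simp

lemma pv_singleton_infix_iff (a : Char) (l : List Char) : [a] <:+: l ↔ a ∈ l := by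
  constructor
  · intro h; exact h.subset (by simp)
  · intro h
    obtain ⟨s, t, rfl⟩ := List.append_of_mem h
    exact ⟨s, t, by simp⟩

lemma pv_singleton_prefix_iff (a : Char) (l : List Char) (i : Nat) :
    [a] <+: l.drop i ↔ l[i]? = some a := by
  constructor
  · intro hp
    obtain ⟨t, ht⟩ := hp
    rw [← List.head?_drop, ← ht]
    rfl
  · intro hh
    rw [← List.head?_drop] at hh
    cases hd : l.drop i with
    | nil => rw [hd] at hh; simp at hh
    | cons x xs =>
      rw [hd] at hh
      simp only [List.head?_cons, Option.some.injEq] at hh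
      subst hh
      exact ⟨xs, by simp⟩

lemma pv_find_not_mem (l : List Char) (ch : Char) (h : ch ∉ l) :
    PySem.Chars.find l [ch] = -1 :=
  (PySem.Chars.find_eq_neg_one_iff l [ch]).mpr (fun hin => h ((pv_singleton_infix_iff ch l).mp hin))

lemma pv_find_mem_spec (l : List Char) (ch : Char) (h : ch ∈ l) :
    0 ≤ PySem.Chars.find l [ch] ∧ l[(PySem.Chars.find l [ch]).toNat]? = some ch ∧
      ∀ k < (PySem.Chars.find l [ch]).toNat, l[k]? ≠ some ch := by
  have hne : PySem.Chars.find l [ch] ≠ -1 := by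
    intro hcontra
    exact (PySem.Chars.find_eq_neg_one_iff l [ch]).mp hcontra ((pv_singleton_infix_iff ch l).mpr h)
  have hspec := PySem.Chars.findFrom_natCast_spec l [ch] 0 (Nat.zero_le _)
    (by simpa [PySem.Chars.findFrom_zero] using hne)
  simp only [Nat.cast_zero, PySem.Chars.findFrom_zero] at hspec
  obtain ⟨h0, hpre, hmin⟩ := hspec
  refine ⟨h0, (pv_singleton_prefix_iff ch l _).mp hpre, ?_⟩
  intro k hk hkk
  exact hmin k (Nat.zero_le _) hk ((pv_singleton_prefix_iff ch l k).mpr hkk)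

lemma pv_alt_nil (password : String)
    (hh : (pvForbidden.map (fun ch => PySem.Str.find password (String.ofList [ch]))).filter
      (fun j => decide (0 ≤ j)) = []) :
    skip_forbidden_tail_py_alt password = password := by
  unfold skip_forbidden_tail_py_alt
  rw [hh]

lemma pv_alt_cons (password : String) (h : Int) (t : List Int)
    (hh : (pvForbidden.map (fun ch => PySem.Str.find password (String.ofList [ch]))).filter
      (fun j => decide (0 ≤ j)) = h :: t) :
    skip_forbidden_tail_py_alt password =
      match PySem.Str.pyGet? password (t.foldl min h) with
      | none => password
      | some c =>
        String.ofList (PySem.List.slice password.toList none (some (t.foldl min h)) ++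
          [Char.ofNat (c.toNat + 1)] ++
          List.replicate (password.toList.length - (t.foldl min h).toNat - 1) 'a') := by
  unfold skip_forbidden_tail_py_alt
  rw [hh]

-- ===== VERDICT (by name: the statement is the Claim_ definition above) =====
theorem skip_forbidden_tail_py_spec : Claim_equal_skip_forbidden_tail_py := by
  intro password _
  unfold Spec_skip_forbidden_tail_py skip_forbidden_tail_py
  by_cases hF : ∀ c ∈ password.toList, c ∉ pvForbidden
  · rw [pvGoA_no _ 0 _ hF]
    have hfind : ∀ ch ∈ pvForbidden, PySem.Str.find password (String.ofList [ch]) = -1 := by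
      intro ch hch
      rw [PySem.Str.find_eq, String.toList_ofList]
      exact pv_find_not_mem _ ch (fun hmem => hF ch hmem hch)
    have hhits : (pvForbidden.map (fun ch => PySem.Str.find password (String.ofList [ch]))).filter
        (fun j => decide (0 ≤ j)) = [] := by
      rw [List.filter_eq_nil_iff]
      intro x hx
      obtain ⟨ch, hch, rfl⟩ := List.mem_map.mp hx
      rw [hfind ch hch]
      decide
    rw [pv_alt_nil password hhits]
    simp
  · push Not at hF
    obtain ⟨c1, hc1mem, hc1F⟩ := hF
    have hex : ∃ k : Nat, ∃ c, password.toList[k]? = some c ∧ c ∈ pvForbidden := by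
      obtain ⟨k, hk, hkeq⟩ := List.mem_iff_getElem.mp hc1mem
      exact ⟨k, c1, by rw [List.getElem?_eq_getElem hk, hkeq], hc1F⟩
    haveI : DecidablePred (fun k : Nat => ∃ c, password.toList[k]? = some c ∧ c ∈ pvForbidden) :=
      fun _ => Classical.dec _
    have key : ∃ j : Nat, (∃ c, password.toList[j]? = some c ∧ c ∈ pvForbidden) ∧
        ∀ k < j, ∀ c, password.toList[k]? = some c → c ∉ pvForbidden :=
      ⟨Nat.find hex, Nat.find_spec hex,
        fun k hk c hck hcF => (Nat.find_min hex hk) ⟨c, hck, hcF⟩⟩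
    obtain ⟨j, ⟨c0, hc0get, hc0F⟩, hminF⟩ := key
    have hc0mem : c0 ∈ password.toList := List.mem_of_getElem? hc0get
    obtain ⟨hf0, hfget, hfmin⟩ := pv_find_mem_spec password.toList c0 hc0mem
    have hfj : PySem.Chars.find password.toList [c0] = (j : Int) := by
      have h1 : ¬ j < (PySem.Chars.find password.toList [c0]).toNat :=
        fun hlt => hfmin j hlt hc0get
      have h2 : ¬ (PySem.Chars.find password.toList [c0]).toNat < j :=
        fun hlt => hminF _ hlt c0 hfget hc0F
      omega
    have hjmem : (j : Int) ∈ (pvForbidden.map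
        (fun ch => PySem.Str.find password (String.ofList [ch]))).filter
        (fun j => decide (0 ≤ j)) := by
      rw [List.mem_filter]
      refine ⟨List.mem_map.mpr ⟨c0, hc0F, ?_⟩, by simp⟩
      rw [PySem.Str.find_eq, String.toList_ofList, hfj]
    have hall : ∀ x ∈ (pvForbidden.map
        (fun ch => PySem.Str.find password (String.ofList [ch]))).filter
        (fun j => decide (0 ≤ j)), (j : Int) ≤ x := by
      intro x hx
      rw [List.mem_filter] at hx
      obtain ⟨hxm, hxpos⟩ := hx
      obtain ⟨ch, hchF, hchx⟩ := List.mem_map.mp hxm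
      have hxpos' : (0 : Int) ≤ x := by simpa using hxpos
      have hfindx : PySem.Chars.find password.toList [ch] = x := by
        rw [← hchx, PySem.Str.find_eq, String.toList_ofList]
      have hchmem : ch ∈ password.toList := by
        by_contra hnm
        have hx1 : x = -1 := by rw [← hfindx, pv_find_not_mem _ ch hnm]
        omega
      obtain ⟨hp0, hpget, hpmin⟩ := pv_find_mem_spec password.toList ch hchmem
      rw [hfindx] at hpget
      have : ¬ x.toNat < j := fun hlt => hminF x.toNat hlt ch hpget hchF
      omega
    cases hhits : (pvForbidden.map
        (fun ch => PySem.Str.find password (String.ofList [ch]))).filter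
        (fun j => decide (0 ≤ j)) with
    | nil => rw [hhits] at hjmem; simp at hjmem
    | cons h t =>
      rw [hhits] at hjmem hall
      have hmin_eq : t.foldl min h = (j : Int) := by
        have h1 := (PySem.List.foldl_min_le t h).1
        have h2 := (PySem.List.foldl_min_le t h).2
        have hge : (j : Int) ≤ t.foldl min h := by
          rcases PySem.List.foldl_min_mem t h with he | hm
          · rw [he]; exact hall h (by simp)
          · exact hall _ (by simp [hm])
        have hle : t.foldl min h ≤ (j : Int) := by
          rcases List.mem_cons.mp hjmem with he | hm
          · rw [he]; exact h1
          · exact h2 _ hm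
        omega
      rw [pv_alt_cons password h t hhits, hmin_eq]
      have hget : PySem.Str.pyGet? password ((j : Nat) : Int) = some c0 := by
        rw [PySem.Str.pyGet?_eq]
        exact (PySem.List.pyGet?_natCast password.toList j).trans hc0get
      rw [hget]
      rw [pvGoA_yes password.toList 0 _ j c0 hc0get hc0F hminF]
      simp [pvIncrChar, PySem.List.slice_to_natCast]
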